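-- pv_equiv track=rewrite | github.com/UlrichBerntien/Codewars-Katas | 7_kyu/Uglify_Word.py | uglify_word
-- ===== SOURCE A (Python) =====
-- def uglify_word(s :str) -> str:
--     flag = True
--     result = ""
--     for c in s:
--         if c.isalpha():
--             result += c.upper() if flag else c.lower()
--             flag = not flag
--         else:
--             result += c
--             flag = True
--     return result
-- ===== SOURCE B (Python) =====
-- def uglify_word(s: str) -> str:
--     # Segment-first decomposition: split s into maximal letter runs and
--     # single non-letters; alternate case inside each run by position parity.
--     parts = []
--     i = 0
--     n = len(s)
--     while i < n:
--         if s[i].isalpha():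
--             j = i
--             while j < n and s[j].isalpha():
--                 j += 1
--             run = s[i:j]
--             parts.append(''.join(c.upper() if k % 2 == 0 else c.lower()
--                                  for k, c in enumerate(run)))
--             i = j
--         else:
--             parts.append(s[i])
--             i += 1
--     return ''.join(parts)
-- ===== Notes on version B (the rewrite author's own statement) =====
-- stated objective: alternative
-- what changed: Replaced A's single pass with a toggling boolean flag by a segment-first decomposition: the string is split into maximal letter runs and single non-letters, each letter run is cased by enumerate-index parity, and the pieces are joined.
import Mathlib
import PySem

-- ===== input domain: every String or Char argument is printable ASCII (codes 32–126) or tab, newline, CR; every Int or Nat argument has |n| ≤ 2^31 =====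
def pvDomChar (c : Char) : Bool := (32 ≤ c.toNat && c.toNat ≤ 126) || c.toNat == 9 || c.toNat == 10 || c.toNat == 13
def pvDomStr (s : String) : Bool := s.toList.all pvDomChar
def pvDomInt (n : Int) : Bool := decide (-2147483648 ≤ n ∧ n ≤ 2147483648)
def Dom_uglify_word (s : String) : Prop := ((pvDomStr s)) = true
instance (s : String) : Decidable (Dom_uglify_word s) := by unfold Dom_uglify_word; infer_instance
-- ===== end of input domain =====

-- B re-implements the flag-toggling loop as segment-first: split into maximal
-- letter runs, alternate case inside each run by position parity (objective: alternative).


-- ===== PORT A =====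
-- A's for-loop over the characters, with the same state (flag, result).
def pvALoop : List Char → Bool → List Char → List Char
  | [], _, result => result
  | c :: rest, flag, result =>
    if PySem.Chars.isalpha c then
      pvALoop rest (!flag)
        (result ++ [if flag then PySem.Chars.upperChar c else PySem.Chars.lowerChar c])
    else
      pvALoop rest true (result ++ [c])

def uglify_word (s : String) : String := String.ofList (pvALoop s.toList true [])

-- ===== PORT B =====
-- one letter run: alternate case by enumerate-index parity (Source B's ''.join(... enumerate ...))
def pvAltRun (run : List Char) : List Char :=
  (PySem.List.enumerate run 0).map
    (fun p => if p.1 % 2 == 0 then PySem.Chars.upperChar p.2 else PySem.Chars.lowerChar p.2)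

-- Source B's outer while; the inner while-scan for the run end is the takeWhile/dropWhile split
def pvSegs : List Char → List Char
  | [] => []
  | c :: rest =>
    if PySem.Chars.isalpha c then
      pvAltRun ((c :: rest).takeWhile PySem.Chars.isalpha)
        ++ pvSegs ((c :: rest).dropWhile PySem.Chars.isalpha)
    else
      c :: pvSegs rest
termination_by cs => cs.length
decreasing_by
  all_goals simp_all
  exact List.length_dropWhile_le _ _

def uglify_word_alt (s : String) : String := String.ofList (pvSegs s.toList)

-- ===== PRECONDITION & SPEC =====
def Spec_uglify_word (s : String) (out : String) : Prop := out = uglify_word_alt s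
instance (s : String) (out : String) : Decidable (Spec_uglify_word s out) := by unfold Spec_uglify_word; infer_instance

-- ===== CLAIM (what is proved, stated in full; the proofs are below) =====
def Claim_equal_uglify_word : Prop := ∀ (s : String), Dom_uglify_word s → Spec_uglify_word s (uglify_word s)

-- ===== LEMMAS AND PROOFS =====

theorem pvDropWhile_head_false {α : Type} (p : α → Bool) :
    ∀ (l : List α) (d : α) (t' : List α), l.dropWhile p = d :: t' → p d = false := by
  intro l
  induction l with
  | nil => intro d t' h; simp [List.dropWhile] at h
  | cons a l ih =>
    intro d t' h
    rw [List.dropWhile_cons] at h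
    by_cases ha : p a = true
    · rw [if_pos ha] at h; exact ih d t' h
    · rw [if_neg ha] at h
      cases h
      simpa using ha

-- A without the accumulator
def pvUgly : List Char → Bool → List Char
  | [], _ => []
  | c :: rest, flag =>
    if PySem.Chars.isalpha c then
      (if flag then PySem.Chars.upperChar c else PySem.Chars.lowerChar c) :: pvUgly rest (!flag)
    else
      c :: pvUgly rest true

theorem pvALoop_eq (cs : List Char) : ∀ flag acc, pvALoop cs flag acc = acc ++ pvUgly cs flag := by
  induction cs with
  | nil => intro flag acc; simp [pvALoop, pvUgly]
  | cons c rest ih =>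
    intro flag acc
    by_cases h : PySem.Chars.isalpha c = true <;>
      simp [pvALoop, pvUgly, h, ih]

-- the alternating map with an explicit starting flag
def pvMapAlt : Bool → List Char → List Char
  | _, [] => []
  | flag, c :: r =>
    (if flag then PySem.Chars.upperChar c else PySem.Chars.lowerChar c) :: pvMapAlt (!flag) r

theorem pvParity_succ (n : Int) : ((n + 1) % 2 == 0) = !(n % 2 == 0) := by
  rcases Int.emod_two_eq_zero_or_one n with h | h <;>
    simp [Int.add_emod, h]

theorem pvMapAlt_eq_enum (r : List Char) :
    ∀ n : Int, pvMapAlt (n % 2 == 0)  r =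
      (PySem.List.enumerate r n).map
        (fun p => if p.1 % 2 == 0 then PySem.Chars.upperChar p.2 else PySem.Chars.lowerChar p.2) := by
  induction r with
  | nil => intro n; simp [pvMapAlt, PySem.List.enumerate_nil]
  | cons c r ih =>
    intro n
    rw [PySem.List.enumerate_cons]
    simp only [List.map_cons, pvMapAlt]
    rw [← ih (n + 1), pvParity_succ]

theorem pvAltRun_eq (r : List Char) : pvAltRun r = pvMapAlt true r := by
  have := pvMapAlt_eq_enum r 0
  simpa [pvAltRun] using this.symm

-- a leading non-letter (or end) resets the flag: pvUgly ignores the incoming flag there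
theorem pvUgly_reset (t : List Char) (flag : Bool)
    (ht : ∀ d, t.head? = some d → PySem.Chars.isalpha d = false) :
    pvUgly t flag = pvUgly t true := by
  cases t with
  | nil => rfl
  | cons d t' =>
    have hd := ht d rfl
    simp [pvUgly, hd]

theorem pvUgly_run (r : List Char) :
    ∀ (t : List Char) (flag : Bool),
    (∀ c ∈ r, PySem.Chars.isalpha c = true) →
    (∀ d, t.head? = some d → PySem.Chars.isalpha d = false) →
    pvUgly (r ++ t) flag = pvMapAlt flag r ++ pvUgly t true := by
  induction r with
  | nil =>
    intro t flag _ ht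
    simpa [pvMapAlt] using pvUgly_reset t flag ht
  | cons c r ih =>
    intro t flag hr ht
    have hc : PySem.Chars.isalpha c = true := hr c (by simp)
    simp only [List.cons_append, pvUgly, hc, if_pos, pvMapAlt]
    rw [ih t (!flag) (fun x hx => hr x (by simp [hx])) ht]

theorem pvUgly_eq_segs (cs : List Char) : pvUgly cs true = pvSegs cs := by
  induction cs using pvSegs.induct with
  | case1 => simp [pvUgly, pvSegs]
  | case2 c rest h ih =>
    rw [pvSegs]
    simp only [if_pos h]
    have hsplit : (c :: rest).takeWhile PySem.Chars.isalpha ++ (c :: rest).dropWhile PySem.Chars.isalpha = c :: rest :=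
      List.takeWhile_append_dropWhile
    have hr : ∀ x ∈ (c :: rest).takeWhile PySem.Chars.isalpha, PySem.Chars.isalpha x = true :=
      fun x hx => List.mem_takeWhile_imp hx
    have ht : ∀ d, ((c :: rest).dropWhile PySem.Chars.isalpha).head? = some d →
        PySem.Chars.isalpha d = false := by
      intro d hd
      cases hh : (c :: rest).dropWhile PySem.Chars.isalpha with
      | nil => simp [hh] at hd
      | cons e t' =>
        rw [hh] at hd
        simp only [List.head?_cons, Option.some.injEq] at hd
        subst hd
        exact pvDropWhile_head_false _ _ _ _ hh
    calc pvUgly (c :: rest) true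
        = pvUgly ((c :: rest).takeWhile PySem.Chars.isalpha ++ (c :: rest).dropWhile PySem.Chars.isalpha) true := by rw [hsplit]
      _ = pvMapAlt true ((c :: rest).takeWhile PySem.Chars.isalpha) ++ pvUgly ((c :: rest).dropWhile PySem.Chars.isalpha) true :=
          pvUgly_run _ _ _ hr ht
      _ = pvAltRun ((c :: rest).takeWhile PySem.Chars.isalpha) ++ pvSegs ((c :: rest).dropWhile PySem.Chars.isalpha) := by
          rw [pvAltRun_eq, ih]
  | case3 c rest h ih =>
    rw [pvSegs]
    simp [pvUgly, h, ih]

-- ===== VERDICT (by name: the statement is the Claim_ definition above) =====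
theorem uglify_word_spec : Claim_equal_uglify_word := by
  intro s _
  unfold Spec_uglify_word uglify_word uglify_word_alt
  rw [pvALoop_eq, pvUgly_eq_segs]
  rfl
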